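-- pv_equiv track=rewrite | github.com/rubensilva091/Python | 100DaysPython Course/3.Advanced 59-80/d62 Coffee_Website/main.py | choices_render
-- ===== SOURCE A (Python) =====
-- def choices_render (object, size):
--     list_choice = []
--     for i in range (0,size):
--         new_string = ""
--         for j in range(0, i+1):
--             new_string+=object
--         choice = (i+1,new_string)
--         list_choice.append(choice)
--     return list_choice
-- ===== SOURCE B (Python) =====
-- def choices_render(object, size):
--     list_choice = []
--     acc = ""
--     for i in range(0, size):
--         acc += object
--         list_choice.append((i + 1, acc))
--     return list_choice
-- ===== Notes on version B (the rewrite author's own statement) =====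
-- stated objective: simpler
-- what changed: Replaces the nested rebuild-from-scratch inner loop with a single pass that extends one running accumulator string once per iteration.
import Mathlib
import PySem

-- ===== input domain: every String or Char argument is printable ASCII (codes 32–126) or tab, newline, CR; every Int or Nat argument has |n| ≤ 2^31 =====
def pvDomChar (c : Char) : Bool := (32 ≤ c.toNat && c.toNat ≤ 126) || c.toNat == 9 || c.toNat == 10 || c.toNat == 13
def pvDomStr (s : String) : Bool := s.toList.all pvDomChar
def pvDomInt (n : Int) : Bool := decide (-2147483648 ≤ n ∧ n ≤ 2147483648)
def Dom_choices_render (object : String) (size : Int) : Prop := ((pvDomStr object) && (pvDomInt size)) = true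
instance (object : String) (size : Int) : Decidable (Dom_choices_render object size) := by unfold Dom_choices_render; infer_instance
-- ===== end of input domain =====

-- B rebuilds each tuple's string with a running accumulator extended once per
-- iteration, instead of A's inner loop that rebuilds it from scratch every time.

-- ===== PORT A =====
def choices_render (object : String) (size : Int) : List (Int × String) :=
  (PySem.List.pyRange 0 size 1).foldl (fun list_choice i =>
    let new_string := (PySem.List.pyRange 0 (i + 1) 1).foldl (fun s _ => s ++ object) ""
    list_choice ++ [(i + 1, new_string)]) []

-- ===== PORT B =====
def choices_render_alt (object : String) (size : Int) : List (Int × String) :=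
  ((PySem.List.pyRange 0 size 1).foldl (fun (p : List (Int × String) × String) i =>
    let acc := p.2 ++ object
    (p.1 ++ [(i + 1, acc)], acc)) ([], "")).1

-- ===== PRECONDITION & SPEC =====
def Spec_choices_render (object : String) (size : Int) (out : List (Int × String)) : Prop := out = choices_render_alt object size
instance (object : String) (size : Int) (out : List (Int × String)) : Decidable (Spec_choices_render object size out) := by unfold Spec_choices_render; infer_instance

-- ===== CLAIM (what is proved, stated in full; the proofs are below) =====
def Claim_equal_choices_render : Prop := ∀ (object : String) (size : Int), Dom_choices_render object size → Spec_choices_render object size (choices_render object size)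

-- ===== LEMMAS AND PROOFS =====

/-- `object` repeated `n` times (appending on the right). -/
def pvRep (object : String) : Nat → String
  | 0 => ""
  | n + 1 => pvRep object n ++ object

theorem pvRep_succ_left (object : String) (n : Nat) :
    pvRep object (n + 1) = object ++ pvRep object n := by
  induction n with
  | zero => simp [pvRep]
  | succ n ih =>
    show pvRep object (n + 1) ++ object = object ++ (pvRep object n ++ object)
    rw [ih, String.append_assoc]

/-- A's inner loop only counts iterations: it appends `object` once per element. -/
theorem inner_foldl (object : String) (l : List Int) (c : String) :
    l.foldl (fun s _ => s ++ object) c = c ++ pvRep object l.length := by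
  induction l generalizing c with
  | nil => simp [pvRep]
  | cons x xs ih =>
    simp only [List.foldl_cons, List.length_cons, ih, pvRep_succ_left, String.append_assoc]

theorem foldl_snoc {α β : Type} (g : α → β) (l : List α) (init : List β) :
    l.foldl (fun L i => L ++ [g i]) init = init ++ l.map g := by
  induction l generalizing init with
  | nil => simp
  | cons x xs ih => simp [ih]

/-- Closed form of A at a nonnegative (cast) size. -/
theorem A_closed (object : String) (n : Nat) :
    choices_render object (n : Int)
      = (List.range n).map (fun (k : Nat) => ((k : Int) + 1, pvRep object (k + 1))) := by
  unfold choices_render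
  rw [foldl_snoc]
  rw [PySem.List.pyRange_one]
  simp only [List.map_map]
  apply List.map_congr_left
  intro k hk
  simp only [Function.comp]
  have hlen : (PySem.List.pyRange 0 ((0 : Int) + (k : Int) + 1) 1).length = k + 1 := by
    rw [PySem.List.length_pyRange_one]; omega
  rw [inner_foldl, hlen]
  simp

/-- Closed form of B's fold, with its final accumulator. -/
theorem B_closed (object : String) (n : Nat) :
    (PySem.List.pyRange 0 (n : Int) 1).foldl (fun (p : List (Int × String) × String) i =>
        let acc := p.2 ++ object
        (p.1 ++ [(i + 1, acc)], acc)) ([], "")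
      = ((List.range n).map (fun (k : Nat) => ((k : Int) + 1, pvRep object (k + 1))),
         pvRep object n) := by
  induction n with
  | zero => simp [PySem.List.pyRange_one_eq_nil, pvRep]
  | succ n ih =>
    have hsplit : PySem.List.pyRange 0 ((n : Int) + 1) 1
        = PySem.List.pyRange 0 (n : Int) 1 ++ [(n : Int)] :=
      PySem.List.pyRange_one_succ_right (by positivity)
    push_cast
    rw [hsplit, List.foldl_append, ih]
    simp [List.range_succ, pvRep]

-- ===== VERDICT (by name: the statement is the Claim_ definition above) =====
theorem choices_render_spec : Claim_equal_choices_render := by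
  intro object size _
  unfold Spec_choices_render choices_render_alt
  by_cases h : size ≤ 0
  · rw [PySem.List.pyRange_one_eq_nil h]
    unfold choices_render
    rw [PySem.List.pyRange_one_eq_nil h]
    simp
  · have hn : ((size.toNat : Nat) : Int) = size := Int.toNat_of_nonneg (by omega)
    rw [← hn, B_closed, A_closed]
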